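-- pv_equiv track=rewrite | github.com/tjcuddihy/AoC2017 | 6-2.py | redistribute_blocks
-- ===== SOURCE A (Python) =====
-- def redistribute_blocks(memoryBanks, n_blocks, index):
--     working_list = memoryBanks.copy()
--     while n_blocks > 0:
--         index = index % len(working_list)
--         working_list[index] += 1
--         index += 1
--         n_blocks -= 1
--     return working_list
-- ===== SOURCE B (Python) =====
-- def redistribute_blocks(memoryBanks, n_blocks, index):
--     if n_blocks <= 0:
--         return memoryBanks.copy()
--     L = len(memoryBanks)
--     base = n_blocks // L
--     extra = n_blocks % L
--     start = index % L
--     return [v + base + (1 if (i - start) % L < extra else 0)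
--             for i, v in enumerate(memoryBanks)]
-- ===== Notes on version B (the rewrite author's own statement) =====
-- stated objective: alternative
-- what changed: Replaced the one-increment-per-block while loop by a closed-form round-robin formula: every bank gets n_blocks//L, and the first n_blocks%L positions counted cyclically from index%L get one extra.
import Mathlib
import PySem

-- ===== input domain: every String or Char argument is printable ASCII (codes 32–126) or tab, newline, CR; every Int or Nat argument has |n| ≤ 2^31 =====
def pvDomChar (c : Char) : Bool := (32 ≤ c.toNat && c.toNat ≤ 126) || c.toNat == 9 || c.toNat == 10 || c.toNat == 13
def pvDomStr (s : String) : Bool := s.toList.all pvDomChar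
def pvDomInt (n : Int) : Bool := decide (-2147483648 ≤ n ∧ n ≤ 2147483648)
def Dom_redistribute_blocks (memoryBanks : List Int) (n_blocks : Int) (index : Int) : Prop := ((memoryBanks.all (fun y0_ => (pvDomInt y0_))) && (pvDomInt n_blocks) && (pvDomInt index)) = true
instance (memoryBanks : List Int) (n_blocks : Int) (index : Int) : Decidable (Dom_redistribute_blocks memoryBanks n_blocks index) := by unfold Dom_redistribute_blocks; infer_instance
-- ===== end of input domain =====

-- B replaces A's one-increment-per-block while loop by the closed-form round-robin
-- distribution formula (base share n_blocks//L plus one extra for the first n_blocks%L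
-- cyclic positions from index%L); return values proved equal on Pre_.

-- ===== PORT A =====
-- the while loop of A: each iteration wraps index, adds 1 to one bank, advances.
def pvALoop (wl : List Int) (n : Int) (idx : Int) : List Int :=
  if h : 0 < n then
    if wl.length = 0 then wl  -- here Python raises ZeroDivisionError (idx % 0); excluded by Pre_
    else
      let i := PySem.Int.mod idx (wl.length : Int)
      pvALoop (PySem.List.pySetD wl i (PySem.List.pyGetD wl i 0 + 1)) (n - 1) (i + 1)
  else wl
termination_by n.toNat
decreasing_by omega

def redistribute_blocks (memoryBanks : List Int) (n_blocks : Int) (index : Int) : List Int :=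
  pvALoop memoryBanks n_blocks index

-- ===== PORT B =====
def redistribute_blocks_alt (memoryBanks : List Int) (n_blocks : Int) (index : Int) : List Int :=
  if n_blocks ≤ 0 then memoryBanks
  else
    let L : Int := (memoryBanks.length : Int)
    let base := PySem.Int.floordiv n_blocks L
    let extra := PySem.Int.mod n_blocks L
    let start := PySem.Int.mod index L
    (PySem.List.enumerate memoryBanks).map
      (fun p => p.2 + base + if PySem.Int.mod (p.1 - start) L < extra then 1 else 0)

-- ===== PRECONDITION & SPEC =====
-- Pre_ excludes only the inputs on which A raises ZeroDivisionError (empty bank list with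
-- blocks still to distribute); B raises there too.
def Pre_redistribute_blocks (memoryBanks : List Int) (n_blocks : Int) (index : Int) : Prop :=
  memoryBanks ≠ [] ∨ n_blocks ≤ 0

instance (memoryBanks : List Int) (n_blocks : Int) (index : Int) : Decidable (Pre_redistribute_blocks memoryBanks n_blocks index) := by unfold Pre_redistribute_blocks; infer_instance

def pvWitness_redistribute_blocks : List Int × Int × Int := ([0, 2], 5, 1)

def Spec_redistribute_blocks (memoryBanks : List Int) (n_blocks : Int) (index : Int) (out : List Int) : Prop := out = redistribute_blocks_alt memoryBanks n_blocks index
instance (memoryBanks : List Int) (n_blocks : Int) (index : Int) (out : List Int) : Decidable (Spec_redistribute_blocks memoryBanks n_blocks index out) := by unfold Spec_redistribute_blocks; infer_instance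

-- ===== CLAIM (what is proved, stated in full; the proofs are below) =====
def Claim_equal_redistribute_blocks : Prop := ∀ (memoryBanks : List Int) (n_blocks : Int) (index : Int), Dom_redistribute_blocks memoryBanks n_blocks index → Pre_redistribute_blocks memoryBanks n_blocks index → Spec_redistribute_blocks memoryBanks n_blocks index (redistribute_blocks memoryBanks n_blocks index)

-- ===== LEMMAS AND PROOFS =====

-- one loop step of A, rephrased arithmetically: adding 1 at position idx % L and then
-- proceeding with n blocks from idx % L + 1 gives the n+1-block formula from idx.
lemma pv_key (L n j idx : Int) (hL : 0 < L) (hn : 0 ≤ n) (hj0 : 0 ≤ j) (hjL : j < L) :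
    (if idx % L = j then (1:Int) else 0) + n / L
      + (if (j - (idx % L + 1)) % L < n % L then (1:Int) else 0)
    = (n + 1) / L + (if (j - idx) % L < (n + 1) % L then (1:Int) else 0) := by
  have hLne : L ≠ 0 := by omega
  set s := idx % L with hs
  have hs0 : 0 ≤ s := Int.emod_nonneg idx hLne
  have hsL : s < L := Int.emod_lt_of_pos idx hL
  set q := n / L with hq
  set r := n % L with hr
  have hr0 : 0 ≤ r := Int.emod_nonneg n hLne
  have hrL : r < L := Int.emod_lt_of_pos n hL
  have hqr : L * q + r = n := Int.ediv_add_emod n L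
  set a := (j - s) % L with ha
  have ha0 : 0 ≤ a := Int.emod_nonneg _ hLne
  have haL : a < L := Int.emod_lt_of_pos _ hL
  have hji : (j - idx) % L = a := by
    rw [ha, Int.sub_emod j s, Int.emod_eq_of_lt hs0 hsL, hs, ← Int.sub_emod]
  have hiff : a = 0 ↔ j = s := by
    constructor
    · intro h0
      obtain ⟨c, hc⟩ := Int.dvd_of_emod_eq_zero (ha ▸ h0)
      have hc1 : c < 1 := by nlinarith
      have hc2 : -1 < c := by nlinarith
      have hc0 : c = 0 := by omega
      rw [hc0, mul_zero] at hc
      omega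
    · intro h; rw [ha, h]; simp
  have hshift : (j - (s + 1)) % L = if a = 0 then L - 1 else a - 1 := by
    have h1 : (j - (s + 1)) % L = (a - 1) % L := by
      rw [show j - (s + 1) = (j - s) - 1 by ring, Int.sub_emod (j - s) 1, ← ha,
        Int.sub_emod a 1, Int.emod_eq_of_lt ha0 haL]
    split_ifs with h0
    · rw [h1, h0]
      rw [show (0 : Int) - 1 = (L - 1) + L * (-1) by ring, Int.add_mul_emod_self_left]
      exact Int.emod_eq_of_lt (by omega) (by omega)
    · rw [h1]; exact Int.emod_eq_of_lt (by omega) (by omega)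
  rw [hji, hshift]
  by_cases hfull : r + 1 = L
  · have hn1 : n + 1 = 0 + L * (q + 1) := by
      have : L * (q + 1) = L * q + L := by ring
      linarith
    have hmod : (n + 1) % L = 0 := by
      rw [hn1, Int.add_mul_emod_self_left]; simp
    have hdiv : (n + 1) / L = q + 1 := by
      rw [hn1, Int.add_mul_ediv_left _ _ hLne]; simp
    rw [hmod, hdiv]
    split_ifs <;> omega
  · have hn1 : n + 1 = (r + 1) + L * q := by linarith
    have hmod : (n + 1) % L = r + 1 := by
      rw [hn1, Int.add_mul_emod_self_left]
      exact Int.emod_eq_of_lt (by omega) (by omega)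
    have hdiv : (n + 1) / L = q := by
      rw [hn1, Int.add_mul_ediv_left _ _ hLne, Int.ediv_eq_zero_of_lt (by omega) (by omega)]
      ring
    rw [hmod, hdiv]
    split_ifs <;> omega

-- characterisation of A's loop by B's closed form (idx fully general for the induction)
lemma pvALoop_eq (k : Nat) : ∀ (wl : List Int) (idx : Int), 0 < wl.length →
    pvALoop wl (k : Int) idx = (PySem.List.enumerate wl).map
      (fun p => p.2 + (k : Int) / (wl.length : Int) +
        if (p.1 - idx) % (wl.length : Int) < (k : Int) % (wl.length : Int) then 1 else 0) := by
  induction k with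
  | zero =>
    intro wl idx hwl
    have hL : (0:Int) < (wl.length : Int) := by exact_mod_cast hwl
    rw [pvALoop]
    simp only [Int.natCast_zero, lt_irrefl, dite_false]
    have : ∀ p ∈ PySem.List.enumerate wl,
        (fun (p : Int × Int) => p.2 + (0 : Int) / (wl.length : Int) +
          if (p.1 - idx) % (wl.length : Int) < (0 : Int) % (wl.length : Int) then 1 else 0) p = p.2 := by
      intro p _
      have hnn : 0 ≤ (p.1 - idx) % (wl.length : Int) := Int.emod_nonneg _ (by omega)
      simp only [Int.zero_ediv, Int.zero_emod, add_zero]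
      rw [if_neg (by omega)]
      ring
    rw [List.map_congr_left this]
    have := PySem.List.map_snd_enumerate (xs := wl) (s := 0)
    simpa using this
  | succ k ih =>
    intro wl idx hwl
    have hL : (0:Int) < (wl.length : Int) := by exact_mod_cast hwl
    have hLne : (wl.length : Int) ≠ 0 := by omega
    rw [pvALoop]
    rw [dif_pos (by exact_mod_cast Nat.succ_pos k), if_neg (by omega)]
    set i := PySem.Int.mod idx (wl.length : Int) with hi
    have hie : i = idx % (wl.length : Int) := PySem.Int.mod_eq_emod_of_pos hL
    have hi0 : 0 ≤ i := by rw [hie]; exact Int.emod_nonneg _ hLne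
    have hiL : i < (wl.length : Int) := by rw [hie]; exact Int.emod_lt_of_pos _ hL
    set wl' := PySem.List.pySetD wl i (PySem.List.pyGetD wl i 0 + 1) with hwl'
    have hset : wl' = wl.set i.toNat (PySem.List.pyGetD wl i 0 + 1) := by
      rw [hwl', PySem.List.pySetD_of_nonneg wl _ hi0]
    have hlen' : wl'.length = wl.length := by rw [hset]; simp
    have hcast : ((k + 1 : Nat) : Int) - 1 = (k : Int) := by push_cast; ring
    rw [hcast, ih wl' (i + 1) (by omega)]
    apply List.ext_getElem
    · simp [hlen']
    intro m hm1 hm2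
    have hmlen : m < wl.length := by simpa [hlen'] using hm1
    have hmlen' : m < wl'.length := by omega
    rw [List.getElem_map, List.getElem_map,
      PySem.List.getElem_enumerate (h := by simpa using hmlen'),
      PySem.List.getElem_enumerate (h := by simpa using hmlen)]
    simp only [hlen', zero_add]
    have hget' : wl'[m]'hmlen' = wl[m]'hmlen + (if idx % (wl.length : Int) = (m : Int) then 1 else 0) := by
      have : wl'[m]'hmlen' = (wl.set i.toNat (PySem.List.pyGetD wl i 0 + 1))[m]'(by rw [hset] at hmlen'; exact hmlen') := by
        simp only [hset]
      rw [this, List.getElem_set]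
      have hgd : PySem.List.pyGetD wl i 0 = wl.getD i.toNat 0 := by
        conv_lhs => rw [show i = (i.toNat : Int) from (Int.toNat_of_nonneg hi0).symm]
        rw [PySem.List.pyGetD_natCast]
      split_ifs with h1 h2 h2
      · -- i.toNat = m and idx % L = m
        rw [hgd, List.getD_eq_getElem _ _ (by omega)]
        simp [h1]
      · -- i.toNat = m but idx % L ≠ m: impossible
        exfalso; apply h2
        rw [← hie, ← h1, Int.toNat_of_nonneg hi0]
      · -- i.toNat ≠ m but idx % L = m: impossible
        exfalso; apply h1
        have : i = (m : Int) := by rw [hie, h2]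
        omega
      · ring
    rw [hget']
    have hkey := pv_key (wl.length : Int) (k : Int) (m : Int) idx hL (by positivity)
      (by positivity) (by exact_mod_cast hmlen)
    have hie' : i + 1 = idx % (wl.length : Int) + 1 := by rw [hie]
    rw [hie']
    push_cast
    push_cast at hkey
    linarith [hkey]

-- ===== VERDICT (by name: the statement is the Claim_ definition above) =====
theorem redistribute_blocks_spec : Claim_equal_redistribute_blocks := by
  intro mb n idx _ hpre
  unfold Spec_redistribute_blocks redistribute_blocks redistribute_blocks_alt
  by_cases hn : 0 < n
  · have hne : mb ≠ [] := by
      rcases hpre with h | h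
      · exact h
      · omega
    have hlen : 0 < mb.length := List.length_pos_of_ne_nil hne
    have hL : (0:Int) < (mb.length : Int) := by exact_mod_cast hlen
    have hLne : (mb.length : Int) ≠ 0 := by omega
    rw [if_neg (by omega)]
    have hk : n = ((n.toNat : Nat) : Int) := (Int.toNat_of_nonneg (le_of_lt hn)).symm
    rw [hk, pvALoop_eq n.toNat mb idx hlen]
    apply List.map_congr_left
    intro p _
    simp only [PySem.Int.floordiv_eq_ediv_of_pos hL, PySem.Int.mod_eq_emod_of_pos hL]
    have : (p.1 - idx % (mb.length : Int)) % (mb.length : Int) = (p.1 - idx) % (mb.length : Int) := by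
      rw [Int.sub_emod p.1 (idx % (mb.length : Int)), Int.emod_emod_of_dvd idx (dvd_refl _),
        ← Int.sub_emod]
    rw [this]
  · rw [pvALoop, dif_neg hn, if_pos (by omega)]
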